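-- pv_equiv track=rewrite | github.com/naisksh32/Coding-Test | Programmers/LV2/250809(1).py | solution
-- ===== SOURCE A (Python) =====
-- def sum_sco(scoville):
--     scoville.sort()
--     scoville.append(scoville.pop(0) + scoville.pop(0) * 2)
--     return scoville
--
-- def solution(scoville, K):
--     # 변수 설정
--     cnt = 0             # 합치는 횟수를 계산하는 변수 설정
--     is_change = False    # 계속 합칠껀지 플래그 변수 설정
--
--     # (0) 조건을 만족할 때까지 반복 시작
--     while True:
--         # 모든 원소에 대해서 검증
--         for i in scoville:
--             # 만약 하나라도 K 미만이면
--             if i < K: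
--                 is_change = True    # 바꾸기 장치 ON(True)
--                 break   # 원소비교를 그만하고 반복문을 탈출하여 그 다음 바꾸기 진행
--
--         # 만약 바꾸기가 True고 합칠 원소가 2개이상 남아있다면
--         if is_change and len(scoville) >= 2:
--             scoville = sum_sco(scoville)    # 합치기 함수 작동
--             is_change = False   # 바꾸기는 다시 OFF(False)로
--             cnt += 1            # 바꾼 횟수 +1
--             continue            # 그리고 처음(0)부터 다시 원소 비교
--
--         # 만약 바꾸기가 True이지만, 합칠 원소가 1개만 남았다면
--         elif is_change and len(scoville) == 1:
--             return -1   # 조건을 만족시킬 수 없으므로 -1 return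
--
--         # 만약 바꾸지 않고, 모든 원소가 K 이상이라면
--         else:
--             return cnt  # 결과 반환
-- ===== SOURCE B (Python) =====
-- def solution(scoville, K):
--     heap = sorted(scoville, reverse=True)   # descending: smallest at the end
--     cnt = 0
--     while heap and heap[-1] < K:
--         if len(heap) == 1:
--             return -1
--         a = heap.pop()
--         b = heap.pop()
--         x = a + 2 * b
--         lo, hi = 0, len(heap)
--         while lo < hi:
--             mid = (lo + hi) // 2
--             if heap[mid] > x:
--                 lo = mid + 1
--             else:
--                 hi = mid
--         heap.insert(lo, x)
--         cnt += 1
--     return cnt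
-- ===== Notes on version B (the rewrite author's own statement) =====
-- stated objective: faster
-- what changed: A re-sorts the whole list on every merge inside a flag-driven while-True scan; B sorts once in descending order, pops the two smallest from the end in O(1) and re-inserts each merged value at the position found by a hand-written binary search, so the per-merge sort and the Python-level scans disappear.
import Mathlib
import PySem

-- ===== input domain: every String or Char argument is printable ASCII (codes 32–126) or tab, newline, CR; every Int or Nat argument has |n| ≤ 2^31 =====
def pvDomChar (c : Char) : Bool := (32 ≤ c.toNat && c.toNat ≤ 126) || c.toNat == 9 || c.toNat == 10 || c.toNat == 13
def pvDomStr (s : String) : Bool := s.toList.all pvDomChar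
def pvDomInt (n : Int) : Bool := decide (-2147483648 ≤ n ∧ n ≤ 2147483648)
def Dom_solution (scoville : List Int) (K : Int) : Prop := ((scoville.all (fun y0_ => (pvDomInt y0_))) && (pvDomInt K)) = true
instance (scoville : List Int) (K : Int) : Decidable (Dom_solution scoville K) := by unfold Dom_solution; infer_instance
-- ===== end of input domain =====

-- B sorts once (descending), pops the two smallest from the end and re-inserts the merged value
-- at the position found by a hand-written binary search, instead of A's full re-sort on every merge.
-- A mutates its list argument in place (sort/pop/append); the equivalence proved here is about the return value only.

-- ===== PORT A =====
-- sum_sco: sort, pop the two smallest, append first + second*2.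
-- (the `_` arm is unreachable in `solution`, which calls it only with length ≥ 2; Python's pop(0) would raise there)
def sum_sco (scoville : List Int) : List Int :=
  match PySem.List.sorted scoville (fun x => x) false with
  | a :: b :: rest => rest ++ [a + b * 2]
  | l => l

-- the while-True loop of `solution`: is_change = "some element < K" (recomputed each round, reset after
-- every merge); fuel = initial length only bounds the recursion (each merge shortens the list by one),
-- the loop itself always exits before fuel runs out
def solutionLoop : Nat → List Int → Int → Int → Int
  | 0, _, _, cnt => cnt
  | fuel + 1, scoville, K, cnt =>
    let is_change := scoville.any (fun i => i < K)
    if is_change ∧ 2 ≤ scoville.length then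
      solutionLoop fuel (sum_sco scoville) K (cnt + 1)
    else if is_change ∧ scoville.length = 1 then
      -1
    else
      cnt

def solution (scoville : List Int) (K : Int) : Int :=
  solutionLoop scoville.length scoville K 0

-- ===== PORT B =====
-- the inner `while lo < hi` binary search of Source B; heap[mid] is in range whenever 0 ≤ lo < hi ≤ len(heap),
-- which holds at every call, so List.getD mid 0 is exact here (Python's heap[mid] raises only out of range);
-- fuel = hi - lo at the call only bounds the recursion (the interval halves each step)
def bsearch : Nat → List Int → Int → Nat → Nat → Nat
  | 0, _, _, lo, _ => lo
  | fuel + 1, heap, x, lo, hi =>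
    if lo < hi then
      let mid := (lo + hi) / 2
      if x < heap.getD mid 0 then          -- heap[mid] > x
        bsearch fuel heap x (mid + 1) hi
      else
        bsearch fuel heap x lo mid
    else lo

-- the outer `while heap and heap[-1] < K` loop of Source B (the condition short-circuits: heap[-1] only on a
-- non-empty heap); fuel = initial length only bounds the recursion (each merge shortens the heap by one)
def solveLoop : Nat → List Int → Int → Int → Int
  | 0, _, _, cnt => cnt
  | fuel + 1, heap, K, cnt =>
    if heap ≠ [] ∧ (PySem.List.pyGet? heap (-1)).getD 0 < K then
      if heap.length = 1 then -1
      else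
        let p1 := (PySem.List.pop? heap).getD (0, [])       -- a = heap.pop()   (heap ≠ [] here, so pop? = some _)
        let p2 := (PySem.List.pop? p1.2).getD (0, [])       -- b = heap.pop()   (len ≥ 2 here, so pop? = some _)
        let x := p1.1 + 2 * p2.1
        let rest := p2.2
        let lo := bsearch rest.length rest x 0 rest.length
        solveLoop fuel (PySem.List.insert rest (lo : Int) x) K (cnt + 1)   -- heap.insert(lo, x)
    else cnt

def solution_alt (scoville : List Int) (K : Int) : Int :=
  solveLoop (PySem.List.sorted scoville (fun x => x) true).length
    (PySem.List.sorted scoville (fun x => x) true) K 0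

-- ===== PRECONDITION & SPEC =====
def Spec_solution (scoville : List Int) (K : Int) (out : Int) : Prop := out = solution_alt scoville K
instance (scoville : List Int) (K : Int) (out : Int) : Decidable (Spec_solution scoville K out) := by unfold Spec_solution; infer_instance

-- ===== CLAIM (what is proved, stated in full; the proofs are below) =====
def Claim_equal_solution : Prop := ∀ (scoville : List Int) (K : Int), Dom_solution scoville K → Spec_solution scoville K (solution scoville K)

-- ===== LEMMAS AND PROOFS =====

-- reverse-sorted is the reverse of sorted: any two descending arrangements of one multiset of Ints coincide
theorem sorted_rev_unique (xs ys : List Int) (hp : ys.Perm xs)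
    (hpw : ys.Pairwise (fun a b => b ≤ a)) :
    PySem.List.sorted xs (fun x => x) true = ys := by
  refine List.Perm.eq_of_pairwise (le := fun a b : Int => b ≤ a)
    (fun a b _ _ h1 h2 => le_antisymm h2 h1) ?_ hpw
    (((PySem.List.sorted_perm ..).trans hp.symm))
  exact PySem.List.sorted_pairwise_rev ..

-- binary-search invariant: everything left of the answer is > x, everything from the answer on is ≤ x
theorem bsearch_spec (n : Nat) (heap : List Int) (x : Int) (lo hi : Nat)
    (hfuel : hi - lo ≤ n) (hlh : lo ≤ hi) (hhi : hi ≤ heap.length)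
    (hpw : heap.Pairwise (fun a b => b ≤ a))
    (hlo : ∀ i < lo, x < heap.getD i 0)
    (hup : ∀ i, hi ≤ i → i < heap.length → heap.getD i 0 ≤ x) :
    bsearch n heap x lo hi ≤ heap.length ∧
    (∀ i < bsearch n heap x lo hi, x < heap.getD i 0) ∧
    (∀ i, bsearch n heap x lo hi ≤ i → i < heap.length → heap.getD i 0 ≤ x) := by
  have hmono : ∀ (i j : Nat), i ≤ j → j < heap.length → heap.getD j 0 ≤ heap.getD i 0 := by
    intro i j hij hj
    rcases Nat.eq_or_lt_of_le hij with rfl | hlt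
    · exact le_refl _
    · rw [List.getD_eq_getElem _ _ hj, List.getD_eq_getElem _ _ (lt_trans hlt hj)]
      exact List.pairwise_iff_getElem.mp hpw i j (lt_trans hlt hj) hj hlt
  induction n generalizing lo hi with
  | zero =>
    have heq : lo = hi := by omega
    subst heq
    simp only [bsearch]
    exact ⟨by omega, hlo, hup⟩
  | succ n ih =>
    by_cases h : lo < hi
    · rw [bsearch, if_pos h]
      by_cases hx : x < heap.getD ((lo + hi) / 2) 0
      · simp only [if_pos hx]
        exact ih ((lo + hi) / 2 + 1) hi (by omega) (by omega) hhi
          (fun i hilt => lt_of_lt_of_le hx (hmono i ((lo + hi) / 2) (by omega) (by omega)))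
          hup
      · simp only [if_neg hx]
        exact ih lo ((lo + hi) / 2) (by omega) (by omega) (by omega) hlo
          (fun i h1 h2 => le_trans (hmono ((lo + hi) / 2) i h1 h2) (by omega))
    · have heq : lo = hi := by omega
      subst heq
      rw [bsearch, if_neg h]
      exact ⟨by omega, hlo, hup⟩

-- inserting x at the binary-search position of a descending list yields a descending permutation of x :: rest
theorem insert_at_pairwise (rest : List Int) (x : Int) (r : Nat)
    (hr : r ≤ rest.length)
    (h1 : ∀ i < r, x < rest.getD i 0)
    (h2 : ∀ i, r ≤ i → i < rest.length → rest.getD i 0 ≤ x)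
    (hpw : rest.Pairwise (fun a b => b ≤ a)) :
    (rest.take r ++ x :: rest.drop r).Pairwise (fun a b => b ≤ a) := by
  rw [List.pairwise_append]
  refine ⟨hpw.sublist (List.take_sublist ..), ?_, ?_⟩
  · rw [List.pairwise_cons]
    refine ⟨?_, hpw.sublist (List.drop_sublist ..)⟩
    intro y hy
    rcases List.mem_iff_getElem.mp hy with ⟨j, hj, rfl⟩
    rw [List.getElem_drop]
    have hj' : r + j < rest.length := by
      have := hj; simp [List.length_drop] at this; omega
    rw [← List.getD_eq_getElem _ 0 hj']
    exact h2 (r + j) (by omega) hj'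
  · intro a ha b hb
    rcases List.mem_iff_getElem.mp ha with ⟨i, hi, rfl⟩
    have hi' : i < r := by have := hi; simp [List.length_take] at this; omega
    have hilen : i < rest.length := by omega
    rw [List.getElem_take, ← List.getD_eq_getElem _ 0 hilen]
    have hxa : x < rest.getD i 0 := h1 i hi'
    rcases List.mem_cons.mp hb with rfl | hbd
    · omega
    · rcases List.mem_iff_getElem.mp hbd with ⟨j, hj, rfl⟩
      rw [List.getElem_drop]
      have hj' : r + j < rest.length := by
        have := hj; simp [List.length_drop] at this; omega
      rw [← List.getD_eq_getElem _ 0 hj']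
      have := h2 (r + j) (by omega) hj'
      omega

-- in an ascending (Pairwise ≤) list, "some element < K" iff the head is < K
theorem any_lt_of_sorted (a : Int) (t : List Int) (K : Int)
    (h : (a :: t).Pairwise (· ≤ ·)) :
    ((a :: t).any (fun i => decide (i < K))) = decide (a < K) := by
  rcases List.pairwise_cons.mp h with ⟨ha, _⟩
  by_cases hK : a < K
  · simp [hK]
  · simp only [List.any_cons, decide_eq_false hK, Bool.false_or]
    simp only [List.any_eq_false]
    intro y hy
    have := ha y hy
    simp; omega

-- core invariant: with enough fuel, A's loop on any list = B's loop on its descending sorted arrangement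
theorem loop_eq (n : Nat) (s : List Int) (K cnt : Int) (hn : s.length ≤ n) :
    solutionLoop n s K cnt = solveLoop n (PySem.List.sorted s (fun x => x) true) K cnt := by
  induction n generalizing s cnt with
  | zero => rw [solutionLoop, solveLoop]
  | succ n ih =>
    have hperm : (PySem.List.sorted s (fun x => x) false).Perm s := PySem.List.sorted_perm ..
    have hpw : (PySem.List.sorted s (fun x => x) false).Pairwise (· ≤ ·) := by
      simpa using PySem.List.sorted_pairwise (xs := s) (key := fun x => x)
    have hany : s.any (fun i => decide (i < K))
        = (PySem.List.sorted s (fun x => x) false).any (fun i => decide (i < K)) :=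
      (List.Perm.any_eq hperm).symm
    have hlen : (PySem.List.sorted s (fun x => x) false).length = s.length := hperm.length_eq
    have hrev : PySem.List.sorted s (fun x => x) true
        = (PySem.List.sorted s (fun x => x) false).reverse := by
      refine sorted_rev_unique _ _ ((List.reverse_perm _).trans hperm) ?_
      exact List.pairwise_reverse.mpr hpw
    rcases hs : PySem.List.sorted s (fun x => x) false with _ | ⟨a, t⟩
    · have : s = [] := by
        have := hperm; rw [hs] at this; exact (List.Perm.nil_eq this).symm
      subst this
      rw [solutionLoop, solveLoop]
      simp [PySem.List.sorted_eq_nil_iff]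
    · rw [hs] at hany hpw hlen hperm hrev
      have hhead := any_lt_of_sorted a t K hpw
      rcases t with _ | ⟨b, rest⟩
      · -- one element: the descending list is [a]
        rw [solutionLoop, solveLoop, hrev]
        simp only [List.reverse_cons, List.reverse_nil, List.nil_append,
          PySem.List.pyGet?_neg_one]
        by_cases hK : a < K
        · have hT : s.any (fun i => decide (i < K)) = true := by rw [hany, hhead]; simp [hK]
          simp [hT, ← hlen, hK]
        · have hF : s.any (fun i => decide (i < K)) = false := by rw [hany, hhead]; simp [hK]
          simp [hF, hK]
      · -- at least two elements: the descending list is rest.reverse ++ [b] ++ [a]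
        rw [solutionLoop, solveLoop, hrev]
        have hd2 : (a :: b :: rest).reverse = (rest.reverse ++ [b]) ++ [a] := by simp
        rw [hd2]
        by_cases hK : a < K
        · have hT : s.any (fun i => decide (i < K)) = true := by rw [hany, hhead]; simp [hK]
          have hlen2 : 2 ≤ s.length := by simp at hlen; omega
          simp only [hT, hlen2, and_true, true_and, if_pos,
            PySem.List.pyGet?_neg_one_append_singleton, Option.getD_some]
          rw [if_pos ⟨by simp, hK⟩, if_neg (by simp)]
          rw [PySem.List.pop?_last, Option.getD_some, PySem.List.pop?_last, Option.getD_some]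
          -- A side: sum_sco s = rest ++ [a + 2*b]
          have hsum : sum_sco s = rest ++ [a + 2 * b] := by
            unfold sum_sco; rw [hs]; ring_nf
          rw [hsum, ih (rest ++ [a + 2 * b]) (cnt + 1) (by simp at hlen ⊢; omega)]
          -- both loops now run on the same descending list
          have hpw_rest : rest.reverse.Pairwise (fun p q : Int => q ≤ p) :=
            List.pairwise_reverse.mpr
              (List.pairwise_cons.mp (List.pairwise_cons.mp hpw).2).2
          obtain ⟨hr, hleft, hright⟩ := bsearch_spec rest.reverse.length rest.reverse (a + 2 * b)
            0 rest.reverse.length (by omega) (by omega) (by omega) hpw_rest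
            (by omega) (fun i h1 h2 => absurd h1 (by omega))
          rw [PySem.List.insert_natCast _ _ _ hr]
          congr 1
          refine sorted_rev_unique _ _ ?_
            (insert_at_pairwise _ _ _ hr hleft hright hpw_rest)
          have hmid : (rest.reverse.take (bsearch rest.reverse.length rest.reverse (a + 2 * b) 0 rest.reverse.length)
              ++ (a + 2 * b) :: rest.reverse.drop (bsearch rest.reverse.length rest.reverse (a + 2 * b) 0 rest.reverse.length)).Perm
              ((a + 2 * b) :: rest.reverse) := by
            have h1 := List.perm_middle (a := a + 2 * b)
              (l₁ := rest.reverse.take (bsearch rest.reverse.length rest.reverse (a + 2 * b) 0 rest.reverse.length))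
              (l₂ := rest.reverse.drop (bsearch rest.reverse.length rest.reverse (a + 2 * b) 0 rest.reverse.length))
            rwa [List.take_append_drop] at h1
          exact hmid.trans ((List.Perm.cons _ (List.reverse_perm rest)).trans
            (List.perm_append_singleton _ _).symm)
        · have hF : s.any (fun i => decide (i < K)) = false := by rw [hany, hhead]; simp [hK]
          rw [show rest.reverse ++ [b] ++ [a] = (rest.reverse ++ [b]) ++ [a] from rfl,
            PySem.List.pyGet?_neg_one_append_singleton]
          simp [hF, hK]

-- ===== VERDICT (by name: the statement is the Claim_ definition above) =====
theorem solution_spec : Claim_equal_solution := by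
  intro scoville K _
  unfold Spec_solution solution solution_alt
  rw [PySem.List.length_sorted]
  exact loop_eq scoville.length scoville K 0 le_rfl
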